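-- pv_equiv track=rewrite | github.com/parshwa1999/PeR-ViS | PeR-ViS WACVw 2021/modalities/HeightEstimation.py | head_feet_points
-- ===== SOURCE A (Python) =====
-- def head_feet_points(x1,y1,x2,y2,mask):
--     y_new = y1
--     while (y_new < y2):
--         m = 0
--         while (mask[y_new - 1][x1 + m - 1]) == False:
--             m = m + 1
--             if x1 + m == x2 - 1:
--                 break
--         if (mask[y_new - 1][x1 + m - 1]) == True:
--             break
--         y_new = y_new + 1
--     y_new_2 = y2
--
--     while (y_new_2 > y1):
--         m = 0
--         while (mask[y_new_2 - 1][x1 + m - 1]) == False: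
--             m = m + 1
--             if x1 + m == x2 - 1:
--                 break
--         if (mask[y_new_2 - 1][x1 + m - 1]) == True:
--             break
--         y_new_2 = y_new_2 - 1
--
--     head_point = [int((x1 + x2) / 2), y_new]
--     feet_point = [int((x1 + x2) / 2), y_new_2]
--     return head_point, feet_point
-- ===== SOURCE B (Python) =====
-- def head_feet_points(x1, y1, x2, y2, mask):
--     cx = int((x1 + x2) / 2)
--     if y1 >= y2:
--         return [cx, y1], [cx, y2]
--     head, feet = y2, y1
--     for c in range(x1 - 1, x2 - 1):
--         for r in range(y1, y2 + 1):
--             if mask[r - 1][c]: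
--                 if r < head:
--                     head = r
--                 if r > feet:
--                     feet = r
--     return [cx, head], [cx, feet]
-- ===== Notes on version B (the rewrite author's own statement) =====
-- stated objective: alternative
-- what changed: Replaces A's two directional early-exit row searches (each rescanning the band on demand with a manual column counter and break cap) by a single column-major sweep over the whole band that aggregates the minimum and maximum hit rows in two accumulators, exploiting that the head/feet rows are the min/max of the hit-row set so the traversal order no longer matters.
import Mathlib
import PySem

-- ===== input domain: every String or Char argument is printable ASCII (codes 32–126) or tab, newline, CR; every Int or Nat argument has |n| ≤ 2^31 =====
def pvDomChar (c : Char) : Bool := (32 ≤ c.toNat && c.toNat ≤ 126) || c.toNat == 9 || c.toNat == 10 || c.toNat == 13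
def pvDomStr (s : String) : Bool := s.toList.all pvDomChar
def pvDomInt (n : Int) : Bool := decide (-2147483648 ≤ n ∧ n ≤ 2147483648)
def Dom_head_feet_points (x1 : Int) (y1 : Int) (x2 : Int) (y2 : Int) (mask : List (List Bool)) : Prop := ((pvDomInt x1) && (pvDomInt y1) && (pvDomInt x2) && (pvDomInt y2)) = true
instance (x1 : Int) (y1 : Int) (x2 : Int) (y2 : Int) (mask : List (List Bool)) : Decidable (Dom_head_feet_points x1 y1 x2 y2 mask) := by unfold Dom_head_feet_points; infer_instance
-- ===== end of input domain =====

-- B replaces A's two directional early-exit row scans by one column-major sweep of the whole band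
-- that aggregates the minimum and maximum hit rows in two accumulators (objective: alternative).

-- ===== PORT A =====
-- mask[y-1]  (Python negative row index wraps; out of range = IndexError, excluded by Pre_)
def pvRowA (mask : List (List Bool)) (y : Int) : List Bool :=
  (PySem.List.pyGet? mask (y - 1)).getD []

-- mask[y-1][x1+m-1]
def pvCellA (mask : List (List Bool)) (x1 y m : Int) : Bool :=
  (PySem.List.pyGet? (pvRowA mask y) (x1 + m - 1)).getD false

-- inner 'while mask[y-1][x1+m-1] == False: m += 1; if x1+m == x2-1: break' (fuel-bounded; inside
-- Pre_ the break cap is reached before the fuel runs out)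
def pvInnerA (mask : List (List Bool)) (x1 x2 y : Int) : Nat → Int → Int
  | 0, m => m
  | Nat.succ f, m =>
    if pvCellA mask x1 y m = false then
      if x1 + (m + 1) = x2 - 1 then m + 1 else pvInnerA mask x1 x2 y f (m + 1)
    else m

-- 'if mask[y-1][x1+m-1] == True: break' check after the inner loop
def pvRowHitA (mask : List (List Bool)) (x1 x2 y : Int) : Bool :=
  pvCellA mask x1 y (pvInnerA mask x1 x2 y (x2 - x1).toNat 0)

-- 'while y_new < y2: … break / y_new += 1'
def pvTopA (mask : List (List Bool)) (x1 x2 y2 : Int) : Nat → Int → Int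
  | 0, y => y
  | Nat.succ f, y =>
    if y < y2 then (if pvRowHitA mask x1 x2 y then y else pvTopA mask x1 x2 y2 f (y + 1)) else y

-- 'while y_new_2 > y1: … break / y_new_2 -= 1'
def pvBotA (mask : List (List Bool)) (x1 x2 y1 : Int) : Nat → Int → Int
  | 0, y => y
  | Nat.succ f, y =>
    if y1 < y then (if pvRowHitA mask x1 x2 y then y else pvBotA mask x1 x2 y1 f (y - 1)) else y

def head_feet_points (x1 : Int) (y1 : Int) (x2 : Int) (y2 : Int) (mask : List (List Bool)) : List Int × List Int :=
  let c := Int.tdiv (x1 + x2) 2   -- int((x1+x2)/2): exact float halving then truncation toward zero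
  ([c, pvTopA mask x1 x2 y2 (y2 - y1).toNat y1], [c, pvBotA mask x1 x2 y1 (y2 - y1).toNat y2])

-- ===== PORT B =====
-- mask[r-1][c]
def pvCellB (mask : List (List Bool)) (r c : Int) : Bool :=
  (PySem.List.pyGet? ((PySem.List.pyGet? mask (r - 1)).getD []) c).getD false

-- loop body: 'if mask[r-1][c]: if r < head: head = r; if r > feet: feet = r'
def pvStepB (mask : List (List Bool)) (c : Int) (hf : Int × Int) (r : Int) : Int × Int :=
  if pvCellB mask r c then
    (if r < hf.1 then r else hf.1, if hf.2 < r then r else hf.2)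
  else hf

def head_feet_points_alt (x1 : Int) (y1 : Int) (x2 : Int) (y2 : Int) (mask : List (List Bool)) : List Int × List Int :=
  let cx := Int.tdiv (x1 + x2) 2
  if y1 ≥ y2 then ([cx, y1], [cx, y2])
  else
    let p := (PySem.List.pyRange (x1 - 1) (x2 - 1) 1).foldl
      (fun hf c => (PySem.List.pyRange y1 (y2 + 1) 1).foldl (pvStepB mask c) hf) (y2, y1)
    ([cx, p.1], [cx, p.2])

-- ===== PRECONDITION & SPEC =====
-- Pre_ excludes inputs on which A's scans leave the stated band: x2 < x1+2 (A scans past the band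
-- until a True or an IndexError), nonpositive x1 or y1 (Python negative-index wraparound), and masks
-- whose rows do not cover the band or with too few rows (IndexError mid-scan) — there A's value,
-- when it returns one at all, is an artefact of its on-demand scanning.
def Pre_head_feet_points (x1 : Int) (y1 : Int) (x2 : Int) (y2 : Int) (mask : List (List Bool)) : Prop :=
  y1 < y2 → (1 ≤ y1 ∧ y2 ≤ (mask.length : Int) ∧ 1 ≤ x1 ∧ x1 + 2 ≤ x2 ∧
             ∀ row ∈ mask, x2 - 1 ≤ (row.length : Int))
instance (x1 : Int) (y1 : Int) (x2 : Int) (y2 : Int) (mask : List (List Bool)) : Decidable (Pre_head_feet_points x1 y1 x2 y2 mask) := by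
  unfold Pre_head_feet_points; infer_instance

def pvWitness_head_feet_points : Int × Int × Int × Int × List (List Bool) :=
  (1, 1, 3, 2, [[true, false], [false, true]])

def Spec_head_feet_points (x1 : Int) (y1 : Int) (x2 : Int) (y2 : Int) (mask : List (List Bool)) (out : List Int × List Int) : Prop := out = head_feet_points_alt x1 y1 x2 y2 mask
instance (x1 : Int) (y1 : Int) (x2 : Int) (y2 : Int) (mask : List (List Bool)) (out : List Int × List Int) : Decidable (Spec_head_feet_points x1 y1 x2 y2 mask out) := by unfold Spec_head_feet_points; infer_instance

-- ===== CLAIM (what is proved, stated in full; the proofs are below) =====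
def Claim_equal_head_feet_points : Prop := ∀ (x1 : Int) (y1 : Int) (x2 : Int) (y2 : Int) (mask : List (List Bool)), Dom_head_feet_points x1 y1 x2 y2 mask → Pre_head_feet_points x1 y1 x2 y2 mask → Spec_head_feet_points x1 y1 x2 y2 mask (head_feet_points x1 y1 x2 y2 mask)

-- ===== LEMMAS AND PROOFS =====

-- the inner while loop: its exit cell is True iff some cell of the band (offsets m..x2-1-x1) is True
theorem pvInnerA_hit (mask : List (List Bool)) (x1 x2 y : Int) :
    ∀ (fuel : Nat) (m : Int), 0 ≤ m → m < x2 - 1 - x1 → x2 - 1 - x1 ≤ m + fuel →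
    (pvCellA mask x1 y (pvInnerA mask x1 x2 y fuel m) = true ↔
      ∃ k : Int, m ≤ k ∧ k ≤ x2 - 1 - x1 ∧ pvCellA mask x1 y k = true) := by
  intro fuel
  induction fuel with
  | zero => intro m h0 h1 h2; omega
  | succ f ih =>
    intro m h0 h1 h2
    by_cases hP : pvCellA mask x1 y m = true
    · simp only [pvInnerA, hP]
      constructor
      · intro _; exact ⟨m, le_refl m, le_of_lt h1, hP⟩
      · intro _; exact hP
    · simp only [pvInnerA, eq_false_of_ne_true hP, if_true]
      by_cases hBr : x1 + (m + 1) = x2 - 1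
      · rw [if_pos hBr]
        have hm1 : m + 1 = x2 - 1 - x1 := by omega
        constructor
        · intro h; exact ⟨m + 1, by omega, by omega, h⟩
        · rintro ⟨k, hk1, hk2, hk⟩
          have : k = m + 1 := by
            rcases eq_or_lt_of_le hk1 with h | h
            · exfalso; rw [← h] at hk; exact hP hk
            · omega
          rwa [← this]
      · rw [if_neg hBr]
        have := ih (m + 1) (by omega) (by omega) (by omega)
        rw [this]
        constructor
        · rintro ⟨k, hk1, hk2, hk⟩; exact ⟨k, by omega, hk2, hk⟩
        · rintro ⟨k, hk1, hk2, hk⟩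
          refine ⟨k, ?_, hk2, hk⟩
          rcases eq_or_lt_of_le hk1 with h | h
          · exfalso; rw [← h] at hk; exact hP hk
          · omega

theorem pvRowHitA_iff (mask : List (List Bool)) (x1 x2 y : Int) (hx : x1 + 2 ≤ x2) :
    (pvRowHitA mask x1 x2 y = true ↔
      ∃ k : Int, 0 ≤ k ∧ k ≤ x2 - 1 - x1 ∧ pvCellA mask x1 y k = true) := by
  unfold pvRowHitA
  exact pvInnerA_hit mask x1 x2 y (x2 - x1).toNat 0 (le_refl 0) (by omega) (by omega)

-- A's cell read at offset k is B's cell read at column x1+k-1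
theorem pvCellA_eq_cellB (mask : List (List Bool)) (x1 y k : Int) :
    pvCellA mask x1 y k = pvCellB mask y (x1 + k - 1) := rfl

-- rowHit ↔ some column of the band (python range(x1-1, x2-1)) holds a True cell
theorem pvRowHitA_iff_col (mask : List (List Bool)) (x1 x2 y : Int) (hx : x1 + 2 ≤ x2) :
    (pvRowHitA mask x1 x2 y = true ↔
      ∃ c ∈ PySem.List.pyRange (x1 - 1) (x2 - 1) 1, pvCellB mask y c = true) := by
  rw [pvRowHitA_iff mask x1 x2 y hx]
  constructor
  · rintro ⟨k, hk0, hk1, hk⟩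
    refine ⟨x1 + k - 1, ?_, ?_⟩
    · rw [PySem.List.mem_pyRange_one]; omega
    · rw [← pvCellA_eq_cellB]; exact hk
  · rintro ⟨c, hc, hcell⟩
    rw [PySem.List.mem_pyRange_one] at hc
    refine ⟨c - x1 + 1, by omega, by omega, ?_⟩
    rw [pvCellA_eq_cellB]
    have : x1 + (c - x1 + 1) - 1 = c := by omega
    rw [this]; exact hcell

-- the inner row fold of B is an independent min- and max-fold over the hit rows of that column
theorem pvInnerFoldB (mask : List (List Bool)) (c : Int) :
    ∀ (R : List Int) (hf : Int × Int),
      R.foldl (pvStepB mask c) hf =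
        ((R.filter (fun r => pvCellB mask r c)).foldl min hf.1,
         (R.filter (fun r => pvCellB mask r c)).foldl max hf.2) := by
  intro R
  induction R with
  | nil => intro hf; simp
  | cons r R ih =>
    intro hf
    simp only [List.foldl_cons, List.filter_cons]
    by_cases h : pvCellB mask r c = true
    · rw [ih]
      simp only [h, if_true, List.foldl_cons]
      have h1 : (pvStepB mask c hf r).1 = min hf.1 r := by
        simp only [pvStepB, h, if_true, min_def]; split_ifs <;> omega
      have h2 : (pvStepB mask c hf r).2 = max hf.2 r := by
        simp only [pvStepB, h, if_true, max_def]; split_ifs <;> omega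
      rw [h1, h2]
    · rw [ih]
      simp only [eq_false_of_ne_true h, Bool.false_eq_true, if_false]
      have : pvStepB mask c hf r = hf := by simp [pvStepB, eq_false_of_ne_true h]
      rw [this]

-- the whole double fold of B is a min- and max-fold over all hit cells' rows
theorem pvFoldB (mask : List (List Bool)) (R : List Int) :
    ∀ (C : List Int) (hf : Int × Int),
      C.foldl (fun hf c => R.foldl (pvStepB mask c) hf) hf =
        ((C.flatMap (fun c => R.filter (fun r => pvCellB mask r c))).foldl min hf.1,
         (C.flatMap (fun c => R.filter (fun r => pvCellB mask r c))).foldl max hf.2) := by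
  intro C
  induction C with
  | nil => intro hf; simp
  | cons c C ih =>
    intro hf
    simp only [List.foldl_cons, List.flatMap_cons, List.foldl_append]
    rw [pvInnerFoldB mask c R hf, ih]

-- properties of a min fold
theorem foldl_min_props (l : List Int) : ∀ a : Int,
    (l.foldl min a = a ∨ l.foldl min a ∈ l) ∧ l.foldl min a ≤ a ∧ ∀ r ∈ l, l.foldl min a ≤ r := by
  induction l with
  | nil => intro a; simp
  | cons x l ih =>
    intro a
    obtain ⟨h1, h2, h3⟩ := ih (min a x)
    rw [List.foldl_cons]
    refine ⟨?_, ?_, ?_⟩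
    · rcases h1 with h | h
      · rw [h]
        rcases min_choice a x with hm | hm
        · exact Or.inl hm
        · right; rw [hm]; exact List.mem_cons_self
      · right; exact List.mem_cons_of_mem _ h
    · exact le_trans h2 (min_le_left a x)
    · intro r hr
      rcases List.mem_cons.mp hr with h | h
      · rw [h]; exact le_trans h2 (min_le_right a x)
      · exact h3 r h

-- properties of a max fold
theorem foldl_max_props (l : List Int) : ∀ a : Int,
    (l.foldl max a = a ∨ l.foldl max a ∈ l) ∧ a ≤ l.foldl max a ∧ ∀ r ∈ l, r ≤ l.foldl max a := by
  induction l with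
  | nil => intro a; simp
  | cons x l ih =>
    intro a
    obtain ⟨h1, h2, h3⟩ := ih (max a x)
    rw [List.foldl_cons]
    refine ⟨?_, ?_, ?_⟩
    · rcases h1 with h | h
      · rw [h]
        rcases max_choice a x with hm | hm
        · exact Or.inl hm
        · right; rw [hm]; exact List.mem_cons_self
      · right; exact List.mem_cons_of_mem _ h
    · exact le_trans (le_max_left a x) h2
    · intro r hr
      rcases List.mem_cons.mp hr with h | h
      · rw [h]; exact le_trans (le_max_right a x) h2
      · exact h3 r h

-- A's top loop: the result is between y and y2, is y2 or a hit row, and every row before it misses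
theorem pvTopA_props (mask : List (List Bool)) (x1 x2 y2 : Int) :
    ∀ (f : Nat) (y : Int), y + (f : Int) = y2 →
      (y ≤ pvTopA mask x1 x2 y2 f y ∧ pvTopA mask x1 x2 y2 f y ≤ y2 ∧
       (pvTopA mask x1 x2 y2 f y = y2 ∨ pvRowHitA mask x1 x2 (pvTopA mask x1 x2 y2 f y) = true) ∧
       ∀ z, y ≤ z → z < pvTopA mask x1 x2 y2 f y → pvRowHitA mask x1 x2 z = false) := by
  intro f
  induction f with
  | zero =>
    intro y hy
    have : y = y2 := by omega
    subst this
    refine ⟨le_refl _, le_refl _, Or.inl rfl, ?_⟩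
    intro z h1 h2
    simp only [pvTopA] at h2
    omega
  | succ f ih =>
    intro y hy
    have hlt : y < y2 := by omega
    by_cases hh : pvRowHitA mask x1 x2 y = true
    · have hres : pvTopA mask x1 x2 y2 (f + 1) y = y := by
        simp [pvTopA, hh]
      rw [hres]
      exact ⟨le_refl _, le_of_lt hlt, Or.inr hh, fun z h1 h2 => by omega⟩
    · have hrec : pvTopA mask x1 x2 y2 (f + 1) y = pvTopA mask x1 x2 y2 f (y + 1) := by
        simp [pvTopA, if_pos hlt, eq_false_of_ne_true hh]
      obtain ⟨i1, i2, i3, i4⟩ := ih (y + 1) (by omega)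
      rw [hrec]
      refine ⟨by omega, i2, i3, ?_⟩
      intro z h1 h2
      rcases eq_or_lt_of_le h1 with h | h
      · rw [← h]; exact eq_false_of_ne_true hh
      · exact i4 z (by omega) h2

-- A's bottom loop: the result is between y1 and y, is y1 or a hit row, and every row after it misses
theorem pvBotA_props (mask : List (List Bool)) (x1 x2 y1 : Int) :
    ∀ (f : Nat) (y : Int), y - (f : Int) = y1 →
      (pvBotA mask x1 x2 y1 f y ≤ y ∧ y1 ≤ pvBotA mask x1 x2 y1 f y ∧
       (pvBotA mask x1 x2 y1 f y = y1 ∨ pvRowHitA mask x1 x2 (pvBotA mask x1 x2 y1 f y) = true) ∧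
       ∀ z, pvBotA mask x1 x2 y1 f y < z → z ≤ y → pvRowHitA mask x1 x2 z = false) := by
  intro f
  induction f with
  | zero =>
    intro y hy
    have : y = y1 := by omega
    subst this
    refine ⟨le_refl _, le_refl _, Or.inl rfl, ?_⟩
    intro z h1 h2
    simp only [pvBotA] at h1
    omega
  | succ f ih =>
    intro y hy
    have hlt : y1 < y := by omega
    by_cases hh : pvRowHitA mask x1 x2 y = true
    · have hres : pvBotA mask x1 x2 y1 (f + 1) y = y := by
        simp [pvBotA, hh]
      rw [hres]
      exact ⟨le_refl _, le_of_lt hlt, Or.inr hh, fun z h1 h2 => by omega⟩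
    · have hrec : pvBotA mask x1 x2 y1 (f + 1) y = pvBotA mask x1 x2 y1 f (y - 1) := by
        simp [pvBotA, if_pos hlt, eq_false_of_ne_true hh]
      obtain ⟨i1, i2, i3, i4⟩ := ih (y - 1) (by omega)
      rw [hrec]
      refine ⟨by omega, i2, i3, ?_⟩
      intro z h1 h2
      rcases eq_or_lt_of_le h2 with h | h
      · rw [h]; exact eq_false_of_ne_true hh
      · exact i4 z h1 (by omega)

-- membership in the flat list of hit rows
theorem pvMemM (mask : List (List Bool)) (x1 x2 y1 y2 r : Int) (hx : x1 + 2 ≤ x2) :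
    (r ∈ (PySem.List.pyRange (x1 - 1) (x2 - 1) 1).flatMap
        (fun c => (PySem.List.pyRange y1 (y2 + 1) 1).filter (fun r => pvCellB mask r c)) ↔
      (y1 ≤ r ∧ r ≤ y2 ∧ pvRowHitA mask x1 x2 r = true)) := by
  rw [List.mem_flatMap]
  constructor
  · rintro ⟨c, hc, hr⟩
    rw [List.mem_filter] at hr
    obtain ⟨hrR, hcell⟩ := hr
    rw [PySem.List.mem_pyRange_one] at hrR
    refine ⟨by omega, by omega, ?_⟩
    rw [pvRowHitA_iff_col mask x1 x2 r hx]
    exact ⟨c, hc, hcell⟩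
  · rintro ⟨h1, h2, hhit⟩
    rw [pvRowHitA_iff_col mask x1 x2 r hx] at hhit
    obtain ⟨c, hc, hcell⟩ := hhit
    refine ⟨c, hc, ?_⟩
    rw [List.mem_filter, PySem.List.mem_pyRange_one]
    exact ⟨⟨by omega, by omega⟩, hcell⟩

-- ===== VERDICT (by name: the statement is the Claim_ definition above) =====
theorem head_feet_points_spec : Claim_equal_head_feet_points := by
  intro x1 y1 x2 y2 mask _hDom hPre
  unfold Spec_head_feet_points
  by_cases hy : y1 < y2
  · obtain ⟨hy1, hy2len, hx1, hx2, hall⟩ := hPre hy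
    unfold head_feet_points head_feet_points_alt
    rw [if_neg (by omega)]
    set M := (PySem.List.pyRange (x1 - 1) (x2 - 1) 1).flatMap
        (fun c => (PySem.List.pyRange y1 (y2 + 1) 1).filter (fun r => pvCellB mask r c)) with hM
    rw [pvFoldB mask (PySem.List.pyRange y1 (y2 + 1) 1) (PySem.List.pyRange (x1 - 1) (x2 - 1) 1) (y2, y1)]
    obtain ⟨t1, t2, t3, t4⟩ := pvTopA_props mask x1 x2 y2 (y2 - y1).toNat y1 (by omega)
    obtain ⟨b1, b2, b3, b4⟩ := pvBotA_props mask x1 x2 y1 (y2 - y1).toNat y2 (by omega)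
    obtain ⟨m1, m2, m3⟩ := foldl_min_props M y2
    obtain ⟨n1, n2, n3⟩ := foldl_max_props M y1
    set T := pvTopA mask x1 x2 y2 (y2 - y1).toNat y1
    set F := pvBotA mask x1 x2 y1 (y2 - y1).toNat y2
    set H := M.foldl min y2
    set G := M.foldl max y1
    have hTH : T = H := by
      apply le_antisymm
      · rcases m1 with h | h
        · omega
        · rw [pvMemM mask x1 x2 y1 y2 H hx2] at h
          obtain ⟨hH1, hH2, hHhit⟩ := h
          by_contra hcon
          have : pvRowHitA mask x1 x2 H = false := t4 H hH1 (by omega)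
          rw [hHhit] at this
          simp at this
      · rcases t3 with h | h
        · omega
        · have hTM : T ∈ M := by
            rw [pvMemM mask x1 x2 y1 y2 T hx2]
            exact ⟨t1, t2, h⟩
          exact m3 T hTM
    have hFG : F = G := by
      apply le_antisymm
      · rcases b3 with h | h
        · omega
        · have hFM : F ∈ M := by
            rw [pvMemM mask x1 x2 y1 y2 F hx2]
            exact ⟨b2, b1, h⟩
          exact n3 F hFM
      · rcases n1 with h | h
        · omega
        · rw [pvMemM mask x1 x2 y1 y2 G hx2] at h
          obtain ⟨hG1, hG2, hGhit⟩ := h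
          by_contra hcon
          have : pvRowHitA mask x1 x2 G = false := b4 G (by omega) hG2
          rw [hGhit] at this
          simp at this
    rw [hTH, hFG]
  · have h0 : (y2 - y1).toNat = 0 := by omega
    unfold head_feet_points head_feet_points_alt
    rw [h0, if_pos (by omega)]
    simp [pvTopA, pvBotA]
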